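-- pv_equiv track=rewrite | github.com/SakshiI10/Python-DSA | 5_Strings/49_Just_One_Mismatch.py | isOneMismatch
-- ===== SOURCE A (Python) =====
-- def isOneMismatch(arr, S):
--     for word in arr:
--         if len(word) != len(S):
--             continue
--
--         count=0
--         for i in range(len(S)):
--             if word[i] != S[i]:
--                 count += 1
--                 if count > 1:
--                     break
--
--         if count == 1:
--             return True
--     return False
-- ===== SOURCE B (Python) =====
-- def isOneMismatch(arr, S):
--     for word in arr:
--         if len(word) != len(S):
--             continue
--         i = None
--         for k, (a, b) in enumerate(zip(word, S)):
--             if a != b: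
--                 i = k
--                 break
--         if i is not None and word[i + 1:] == S[i + 1:]:
--             return True
--     return False
-- ===== Notes on version B (the rewrite author's own statement) =====
-- stated objective: alternative
-- what changed: Replaces A's capped mismatch-counting loop with a first-difference search followed by a single bulk suffix-equality comparison.
import Mathlib
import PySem

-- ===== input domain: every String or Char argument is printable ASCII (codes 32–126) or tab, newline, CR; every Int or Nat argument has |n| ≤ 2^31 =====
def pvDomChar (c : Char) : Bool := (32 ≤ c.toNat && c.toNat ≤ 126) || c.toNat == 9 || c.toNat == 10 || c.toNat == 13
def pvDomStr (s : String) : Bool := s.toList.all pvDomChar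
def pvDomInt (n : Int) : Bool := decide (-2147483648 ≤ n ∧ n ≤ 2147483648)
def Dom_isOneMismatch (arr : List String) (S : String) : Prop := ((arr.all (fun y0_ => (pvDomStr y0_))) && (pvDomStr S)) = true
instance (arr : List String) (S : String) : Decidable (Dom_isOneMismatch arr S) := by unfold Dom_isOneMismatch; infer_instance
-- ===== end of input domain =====

-- B replaces A's capped mismatch-counting loop by a first-difference search plus one
-- bulk suffix-equality comparison (objective: alternative decomposition, same cost).

-- ===== PORT A =====
-- inner loop of A: for i in range(len(S)): if word[i] != S[i]: count += 1; if count > 1: break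
-- (indexing is safe: the loop runs only when len(word) == len(S)); getD is exact here.
def pvACount (wc sc : List Char) (i count : Nat) : Nat :=
  if i < sc.length then
    let count' := if wc.getD i ' ' ≠ sc.getD i ' ' then count + 1 else count
    if count' > 1 then count'
    else pvACount wc sc (i + 1) count'
  else count
termination_by sc.length - i

def isOneMismatch (arr : List String) (S : String) : Bool :=
  match arr with
  | [] => false
  | word :: rest =>
    if word.toList.length ≠ S.toList.length then isOneMismatch rest S
    else if pvACount word.toList S.toList 0 0 = 1 then true
    else isOneMismatch rest S

-- ===== PORT B =====
-- first mismatch position of the zipped strings (None if the common prefix never differs)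
def pvFirstDiff (wc sc : List Char) : Option Nat :=
  match wc, sc with
  | a :: as', b :: bs => if a ≠ b then some 0 else (pvFirstDiff as' bs).map (· + 1)
  | _, _ => none

def isOneMismatch_alt (arr : List String) (S : String) : Bool :=
  match arr with
  | [] => false
  | word :: rest =>
    if word.toList.length ≠ S.toList.length then isOneMismatch_alt rest S
    else
      match pvFirstDiff word.toList S.toList with
      | none => isOneMismatch_alt rest S
      | some i =>
        -- word[i+1:] == S[i+1:] ; i+1 ≥ 0 so the slice is List.drop
        if word.toList.drop (i + 1) = S.toList.drop (i + 1) then true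
        else isOneMismatch_alt rest S

-- ===== PRECONDITION & SPEC =====
def Spec_isOneMismatch (arr : List String) (S : String) (out : Bool) : Prop := out = isOneMismatch_alt arr S
instance (arr : List String) (S : String) (out : Bool) : Decidable (Spec_isOneMismatch arr S out) := by unfold Spec_isOneMismatch; infer_instance

-- ===== CLAIM (what is proved, stated in full; the proofs are below) =====
def Claim_equal_isOneMismatch : Prop := ∀ (arr : List String) (S : String), Dom_isOneMismatch arr S → Spec_isOneMismatch arr S (isOneMismatch arr S)

-- ===== LEMMAS AND PROOFS =====

-- structural view of A's inner loop
def pvCMis (wc sc : List Char) (c : Nat) : Nat :=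
  match wc, sc with
  | a :: as', b :: bs =>
    let c' := if a ≠ b then c + 1 else c
    if c' > 1 then c' else pvCMis as' bs c'
  | _, _ => c

theorem pvACount_eq_cmis (wc sc : List Char) (i c : Nat) (hlen : wc.length = sc.length) :
    pvACount wc sc i c = pvCMis (wc.drop i) (sc.drop i) c := by
  induction' hfuel : sc.length - i using Nat.strong_induction_on with n ih generalizing i c
  rw [pvACount]
  by_cases h : i < sc.length
  · have hw : i < wc.length := hlen ▸ h
    have hdw : wc.drop i = wc[i] :: wc.drop (i + 1) := List.drop_eq_getElem_cons hw
    have hds : sc.drop i = sc[i] :: sc.drop (i + 1) := List.drop_eq_getElem_cons h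
    have hgw : wc.getD i ' ' = wc[i] := by simp [List.getD, hw]
    have hgs : sc.getD i ' ' = sc[i] := by simp [List.getD, h]
    rw [hdw, hds, pvCMis]
    simp only [h, if_pos, hgw, hgs]
    set c' := if wc[i] ≠ sc[i] then c + 1 else c with hc'
    by_cases hb : c' > 1
    · simp [hb]
    · simp only [hb, if_false]
      subst hfuel
      exact ih (sc.length - (i + 1)) (by omega) (i + 1) c' rfl
  · have hsi : sc.length ≤ i := by omega
    rw [if_neg h, List.drop_eq_nil_of_le (hlen ▸ hsi : wc.length ≤ i),
      List.drop_eq_nil_of_le hsi]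
    rfl

-- a run started at count 1 stays 1 iff no further mismatch, i.e. the lists are equal
theorem pvCMis_one (wc sc : List Char) (hlen : wc.length = sc.length) :
    (pvCMis wc sc 1 = 1) ↔ wc = sc := by
  induction wc generalizing sc with
  | nil => cases sc with
    | nil => simp [pvCMis]
    | cons b bs => simp at hlen
  | cons a as' ih => cases sc with
    | nil => simp at hlen
    | cons b bs =>
      by_cases hab : a = b
      · subst hab
        simp only [pvCMis, ne_eq, not_true_eq_false, if_false, gt_iff_lt,
          Nat.lt_irrefl, List.cons.injEq, true_and]
        exact ih bs (by simpa using hlen)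
      · simp [pvCMis, hab]

-- key per-word lemma: A's count-is-1 test equals B's first-diff + suffix test
theorem perWord (wc sc : List Char) (hlen : wc.length = sc.length) :
    (pvCMis wc sc 0 = 1) ↔
      (match pvFirstDiff wc sc with
       | none => False
       | some i => wc.drop (i + 1) = sc.drop (i + 1)) := by
  induction wc generalizing sc with
  | nil => cases sc with
    | nil => simp [pvCMis, pvFirstDiff]
    | cons b bs => simp at hlen
  | cons a as' ih => cases sc with
    | nil => simp at hlen
    | cons b bs =>
      have hlen' : as'.length = bs.length := by simpa using hlen
      by_cases hab : a = b
      · subst hab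
        simp only [pvCMis, pvFirstDiff, ne_eq, not_true_eq_false, if_false,
          gt_iff_lt]
        rw [if_neg (by omega : ¬ (1 : Nat) < 0), ih bs hlen']
        cases h : pvFirstDiff as' bs with
        | none => simp
        | some i => simp [List.drop]
      · simp only [pvCMis, pvFirstDiff, ne_eq, hab, not_false_iff, if_true,
          gt_iff_lt, show ¬ (1 : Nat) > 1 by omega, if_false]
        rw [pvCMis_one as' bs hlen']
        simp [List.drop]

theorem main_eq (arr : List String) (S : String) :
    isOneMismatch arr S = isOneMismatch_alt arr S := by
  induction arr with
  | nil => rfl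
  | cons word rest ih =>
    rw [isOneMismatch, isOneMismatch_alt]
    by_cases hlen : word.toList.length = S.toList.length
    · have hne : ¬ (word.toList.length ≠ S.toList.length) := by simp [hlen]
      rw [if_neg hne]
      have h1 := pvACount_eq_cmis word.toList S.toList 0 0 hlen
      simp only [List.drop_zero] at h1
      have h2 := perWord word.toList S.toList hlen
      rw [h1]
      cases hfd : pvFirstDiff word.toList S.toList with
      | none =>
        rw [hfd] at h2
        simp only [iff_false] at h2
        simp only [if_neg hne, if_neg h2]
        exact ih
      | some i =>
        rw [hfd] at h2
        simp only at h2
        by_cases hsuf : word.toList.drop (i + 1) = S.toList.drop (i + 1)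
        · simp only [if_pos (h2.mpr hsuf), if_neg hne, if_pos hsuf]
        · simp only [if_neg (fun h => hsuf (h2.mp h)), if_neg hne, if_neg hsuf]
          exact ih
    · rw [if_pos hlen, if_pos hlen, ih]

-- ===== VERDICT (by name: the statement is the Claim_ definition above) =====
theorem isOneMismatch_spec : Claim_equal_isOneMismatch := by
  intro arr S _
  unfold Spec_isOneMismatch
  exact main_eq arr S
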